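-- pv_equiv track=rewrite | github.com/starsdaisuki/wzu-scraper | main.py | _parse_index_selection
-- ===== SOURCE A (Python) =====
-- def _parse_index_selection(items, raw: str):
--     selected = []
--     seen = set()
--     for part in raw.replace(" ", "").split(","):
--         if not part:
--             continue
--         try:
--             idx = int(part) - 1
--         except ValueError:
--             return []
--         if idx < 0 or idx >= len(items) or idx in seen:
--             continue
--         seen.add(idx)
--         selected.append(items[idx])
--     return selected
-- ===== SOURCE B (Python) =====
-- def _parse_index_selection(items, raw: str):
--     try:
--         idxs = [int(p) - 1 for p in raw.replace(" ", "").split(",") if p]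
--     except ValueError:
--         return []
--     valid = {i for i in idxs if 0 <= i < len(items)}
--     return [items[i] for i in sorted(valid, key=idxs.index)]
-- ===== Notes on version B (the rewrite author's own statement) =====
-- stated objective: alternative
-- what changed: B replaces A's streaming seen-set loop by parsing all indices up front and then deduplicating via a set comprehension plus a sort keyed by each index's first occurrence (idxs.index), so no sequential seen-set is maintained at all.
import Mathlib
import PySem

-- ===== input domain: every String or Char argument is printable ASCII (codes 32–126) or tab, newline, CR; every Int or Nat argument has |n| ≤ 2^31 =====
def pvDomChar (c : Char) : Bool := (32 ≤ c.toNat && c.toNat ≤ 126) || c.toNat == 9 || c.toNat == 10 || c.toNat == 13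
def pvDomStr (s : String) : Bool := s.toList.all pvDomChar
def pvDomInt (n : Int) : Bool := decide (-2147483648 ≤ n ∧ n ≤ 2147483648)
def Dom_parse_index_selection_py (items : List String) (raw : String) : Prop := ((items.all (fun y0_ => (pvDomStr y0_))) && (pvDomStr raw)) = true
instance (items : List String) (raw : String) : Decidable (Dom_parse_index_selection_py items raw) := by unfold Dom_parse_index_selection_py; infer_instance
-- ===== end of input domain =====

-- B parses all indices up front, then deduplicates via a set plus a sort keyed by first occurrence (no streaming seen-set); return values proved equal on the whole domain.

-- ===== PORT A =====
-- A's single loop over the comma parts, carrying (selected, seen).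
def parseIndexLoopA (items : List String) : List String → List String → PySem.Set Int → List String
  | [], sel, _ => sel
  | p :: rest, sel, seen =>
    if p = "" then parseIndexLoopA items rest sel seen
    else
      match PySem.Int.ofStr? p with
      | none => []
      | some n =>
        let idx := n - 1
        if idx < 0 ∨ (items.length : Int) ≤ idx ∨ PySem.Set.contains seen idx then
          parseIndexLoopA items rest sel seen
        else
          parseIndexLoopA items rest (sel ++ [(PySem.List.pyGet? items idx).getD ""]) (PySem.Set.add seen idx)

def parse_index_selection_py (items : List String) (raw : String) : List String :=
  parseIndexLoopA items (((PySem.Str.split? (PySem.Str.replace raw " " "") ",").getD [])) [] PySem.Set.empty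

-- ===== PORT B =====
-- the parsing comprehension: every non-empty part converted by int(p) - 1; none = ValueError
def parseAllB (parts : List String) : Option (List Int) :=
  parts.mapM (fun p => (PySem.Int.ofStr? p).map (· - 1))

def parse_index_selection_py_alt (items : List String) (raw : String) : List String :=
  match parseAllB ((((PySem.Str.split? (PySem.Str.replace raw " " "") ",").getD [])).filter (fun p => !decide (p = ""))) with
  | none => []
  | some idxs =>
    -- {i for i in idxs if 0 <= i < len(items)} then sorted(valid, key=idxs.index)
    let valid : PySem.Set Int := PySem.Set.ofList (idxs.filter (fun i => decide (0 ≤ i) && decide (i < (items.length : Int))))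
    (PySem.List.sorted valid (fun i => (PySem.List.index? idxs i).getD 0) false).map
      (fun i => (PySem.List.pyGet? items i).getD "")

-- ===== PRECONDITION & SPEC =====
def Spec_parse_index_selection_py (items : List String) (raw : String) (out : List String) : Prop := out = parse_index_selection_py_alt items raw
instance (items : List String) (raw : String) (out : List String) : Decidable (Spec_parse_index_selection_py items raw out) := by unfold Spec_parse_index_selection_py; infer_instance

-- ===== CLAIM (what is proved, stated in full; the proofs are below) =====
def Claim_equal_parse_index_selection_py : Prop := ∀ (items : List String) (raw : String), Dom_parse_index_selection_py items raw → Spec_parse_index_selection_py items raw (parse_index_selection_py items raw)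

-- ===== LEMMAS AND PROOFS =====

-- proof-side streaming selector: A's loop restricted to already-parsed indices
def selectB (items : List String) : List Int → PySem.Set Int → List String
  | [], _ => []
  | idx :: rest, seen =>
    if 0 ≤ idx ∧ idx < (items.length : Int) ∧ ¬ PySem.Set.contains seen idx then
      (PySem.List.pyGet? items idx).getD "" :: selectB items rest (PySem.Set.add seen idx)
    else
      selectB items rest seen

theorem loopA_eq (items : List String) (parts : List String) (sel : List String) (seen : PySem.Set Int) :
    parseIndexLoopA items parts sel seen =
      match parseAllB (parts.filter (fun p => !decide (p = ""))) with
      | none => []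
      | some idxs => sel ++ selectB items idxs seen := by
  induction parts generalizing sel seen with
  | nil => simp [parseIndexLoopA, parseAllB, selectB]
  | cons p rest ih =>
    by_cases hp : p = ""
    · simp [parseIndexLoopA, hp, ih]
    · simp only [parseIndexLoopA, List.filter_cons]
      rw [if_neg hp]
      rw [if_pos (by simp [hp])]
      cases hof : PySem.Int.ofStr? p with
      | none => simp [parseAllB, hof]
      | some n =>
        dsimp only
        have hparse : parseAllB (p :: List.filter (fun p => !decide (p = "")) rest)
            = (parseAllB (List.filter (fun p => !decide (p = "")) rest)).map (fun l => (n - 1) :: l) := by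
          simp only [parseAllB, List.mapM_cons, hof, Option.map_some]
          cases List.mapM (fun p => (PySem.Int.ofStr? p).map (· - 1)) (List.filter (fun p => !decide (p = "")) rest) <;> rfl
        rw [hparse]
        by_cases hc : n - 1 < 0 ∨ (items.length : Int) ≤ n - 1 ∨ PySem.Set.contains seen (n - 1)
        · rw [if_pos hc, ih]
          cases parseAllB (List.filter (fun p => !decide (p = "")) rest) with
          | none => rfl
          | some idxs =>
            simp only [Option.map_some]
            conv_rhs => rw [selectB]
            rw [if_neg]
            intro ⟨h1, h2, h3⟩
            rcases hc with h | h | h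
            · omega
            · omega
            · exact h3 h
        · rw [if_neg hc, ih]
          cases parseAllB (List.filter (fun p => !decide (p = "")) rest) with
          | none => rfl
          | some idxs =>
            simp only [Option.map_some]
            conv_rhs => rw [selectB]
            rw [if_pos]
            · simp
            · exact ⟨by omega, by omega, fun h => hc (Or.inr (Or.inr h))⟩

-- foldl over Set.add only appends new elements
theorem foldl_add_prefix (l : List Int) (s : PySem.Set Int) :
    ∃ u, l.foldl PySem.Set.add s = s ++ u := by
  induction l generalizing s with
  | nil => exact ⟨[], by simp⟩
  | cons x r ih =>
    simp only [List.foldl_cons]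
    by_cases hx : x ∈ s
    · rw [PySem.Set.add_of_mem hx]; exact ih s
    · rw [PySem.Set.add_of_not_mem hx]
      obtain ⟨u, hu⟩ := ih (s ++ [x])
      exact ⟨x :: u, by simpa using hu⟩

-- A's streaming selector computes items at the first-occurrence dedup of the in-range indices
theorem selectB_eq_foldl (items : List String) (idxs : List Int) (seen : PySem.Set Int) :
    selectB items idxs seen =
      (((idxs.filter (fun i => decide (0 ≤ i) && decide (i < (items.length : Int)))).foldl
          PySem.Set.add seen).drop seen.length).map (fun i => (PySem.List.pyGet? items i).getD "") := by
  induction idxs generalizing seen with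
  | nil => simp [selectB]
  | cons idx rest ih =>
    by_cases hr : 0 ≤ idx ∧ idx < (items.length : Int)
    · by_cases hs : PySem.Set.contains seen idx
      · have hmem : idx ∈ seen := (PySem.Set.contains_iff seen idx).mp hs
        rw [selectB, if_neg (fun h => h.2.2 hs)]
        rw [List.filter_cons, if_pos (by simp [hr.1, hr.2]), List.foldl_cons,
          PySem.Set.add_of_mem hmem]
        exact ih seen
      · have hmem : idx ∉ seen := fun h => hs ((PySem.Set.contains_iff seen idx).mpr h)
        rw [selectB, if_pos ⟨hr.1, hr.2, hs⟩]
        rw [List.filter_cons, if_pos (by simp [hr.1, hr.2]), List.foldl_cons,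
          PySem.Set.add_of_not_mem hmem]
        obtain ⟨u, hu⟩ := foldl_add_prefix
          (rest.filter (fun i => decide (0 ≤ i) && decide (i < (items.length : Int)))) (seen ++ [idx])
        rw [ih (seen ++ [idx]), hu]
        have h1 : ((seen ++ [idx]) ++ u).drop seen.length = idx :: u := by
          rw [List.append_assoc, List.drop_append_of_le_length (by simp), List.drop_length]
          rfl
        have h2 : ((seen ++ [idx]) ++ u).drop (seen ++ [idx]).length = u := by
          rw [List.drop_append_of_le_length (by simp), List.drop_length]
          rfl
        rw [h1, h2, List.map_cons]
    · rw [selectB, if_neg (fun h => hr ⟨h.1, h.2.1⟩)]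
      rw [List.filter_cons, if_neg (by simpa [Decidable.not_and_iff_not_or_not] using hr)]
      exact ih seen

-- foldl add with a distinguished head: the head stays first, later copies of it are ignored
theorem foldl_add_cons (l : List Int) (s : PySem.Set Int) (c : Int) (hc : c ∉ s) :
    l.foldl PySem.Set.add (c :: s) = c :: (l.filter (fun x => !(x == c))).foldl PySem.Set.add s := by
  induction l generalizing s with
  | nil => simp
  | cons x r ih =>
    simp only [List.foldl_cons, List.filter_cons]
    by_cases hxc : x = c
    · subst hxc
      rw [PySem.Set.add_of_mem (by simp)]
      simp [ih s hc]
    · by_cases hxs : x ∈ s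
      · rw [PySem.Set.add_of_mem (by simp [hxs]), if_pos (by simp [hxc]), List.foldl_cons,
          PySem.Set.add_of_mem hxs]
        exact ih s hc
      · rw [PySem.Set.add_of_not_mem (by simp [hxc, hxs]), if_pos (by simp [hxc]), List.foldl_cons,
          PySem.Set.add_of_not_mem hxs]
        exact ih (s ++ [x]) (by simp [hc]; exact fun h => hxc h.symm)

-- the key: getD 0 of index? for members
theorem key_cons_of_ne (m : List Int) (c a : Int) (ha : a ∈ m) (hne : a ≠ c) :
    (PySem.List.index? (c :: m) a).getD 0 = (PySem.List.index? m a).getD 0 + 1 := by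
  rw [PySem.List.index?_cons_of_ne m (fun h => hne h.symm)]
  obtain ⟨k, hk⟩ := Option.isSome_iff_exists.mp ((PySem.List.index?_isSome_iff m a).mpr ha)
  rw [hk]
  rfl

-- the first-occurrence dedup of any value-filtered sublist of m is strictly increasing under first occurrence in m
theorem ofList_filter_pairwise (m : List Int) (p : Int → Bool) :
    (PySem.Set.ofList (m.filter p)).Pairwise
      (fun a b => (PySem.List.index? m a).getD 0 < (PySem.List.index? m b).getD 0) := by
  induction m generalizing p with
  | nil => simp [PySem.Set.ofList]
  | cons c m' ih =>
    have hmem_of : ∀ (q : Int → Bool) a, a ∈ PySem.Set.ofList (m'.filter q) → a ∈ m' ∧ q a = true := by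
      intro q a ha
      have := (PySem.Set.mem_ofList _ a).mp ha
      exact ⟨List.mem_of_mem_filter this, List.of_mem_filter this⟩
    by_cases hpc : p c
    · rw [List.filter_cons, if_pos hpc]
      have hof : PySem.Set.ofList (c :: m'.filter p)
          = c :: ((m'.filter p).filter (fun x => !(x == c))).foldl PySem.Set.add [] := by
        show List.foldl PySem.Set.add (PySem.Set.add [] c) (m'.filter p) = _
        rw [PySem.Set.add_of_not_mem (by simp)]
        exact foldl_add_cons _ [] c (by simp)
      rw [hof, List.filter_filter]
      have htail := ih (fun x => !(x == c) && p x)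
      have hkc : (PySem.List.index? (c :: m') c).getD 0 = 0 := by
        rw [PySem.List.index?_cons_self]; rfl
      constructor
      · intro b hb
        obtain ⟨hbm, hbq⟩ := hmem_of _ b (by simpa [PySem.Set.ofList] using hb)
        have hbne : b ≠ c := by simpa using (Bool.and_elim_left hbq)
        rw [key_cons_of_ne m' c b hbm hbne, hkc]
        omega
      · refine htail.imp_of_mem ?_
        intro a b ha hb hab
        obtain ⟨ham, haq⟩ := hmem_of _ a ha
        obtain ⟨hbm, hbq⟩ := hmem_of _ b hb
        rw [key_cons_of_ne m' c a ham (by simpa using (Bool.and_elim_left haq)),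
          key_cons_of_ne m' c b hbm (by simpa using (Bool.and_elim_left hbq))]
        omega
    · rw [List.filter_cons, if_neg (by simpa using hpc)]
      refine (ih p).imp_of_mem ?_
      intro a b ha hb hab
      obtain ⟨ham, haq⟩ := hmem_of _ a ha
      obtain ⟨hbm, hbq⟩ := hmem_of _ b hb
      have hac : a ≠ c := fun h => by subst h; exact absurd haq (by simpa using hpc)
      have hbc : b ≠ c := fun h => by subst h; exact absurd hbq (by simpa using hpc)
      rw [key_cons_of_ne m' c a ham hac, key_cons_of_ne m' c b hbm hbc]
      omega

-- verdict-side case split, kept out of the main proof to avoid heavy scrutinees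
theorem final_case (items : List String) (o : Option (List Int)) :
    (match o with
      | none => []
      | some idxs => [] ++ selectB items idxs PySem.Set.empty)
    = match o with
      | none => []
      | some idxs =>
        (PySem.List.sorted
            (PySem.Set.ofList (idxs.filter (fun i => decide (0 ≤ i) && decide (i < (items.length : Int)))))
            (fun i => (PySem.List.index? idxs i).getD 0) false).map
          (fun i => (PySem.List.pyGet? items i).getD "") := by
  cases o with
  | none => rfl
  | some idxs =>
    simp only [List.nil_append]
    rw [selectB_eq_foldl]
    rw [PySem.List.sorted_eq_of_perm_of_pairwise_lt _ _ _ (List.Perm.refl _)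
      (ofList_filter_pairwise idxs (fun i => decide (0 ≤ i) && decide (i < (items.length : Int))))]
    simp [PySem.Set.ofList, PySem.Set.empty]

-- ===== VERDICT (by name: the statement is the Claim_ definition above) =====
set_option maxHeartbeats 1000000 in
theorem parse_index_selection_py_spec : Claim_equal_parse_index_selection_py := by
  intro items raw _
  unfold Spec_parse_index_selection_py parse_index_selection_py parse_index_selection_py_alt
  rw [loopA_eq]
  exact final_case items _
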